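-- pv_equiv track=rewrite | github.com/tim-osterhus/millrace | millrace_engine/tui/formatting.py | _strip_leading_date_tokens
-- ===== SOURCE A (Python) =====
-- def _strip_leading_date_tokens(slug: str) -> str:
--     tokens = [token for token in slug.split("-") if token]
--     index = 0
--     while index + 2 < len(tokens):
--         year, month, day = tokens[index : index + 3]
--         if not (len(year) == 4 and year.isdigit() and len(month) == 2 and month.isdigit() and len(day) == 2 and day.isdigit()):
--             break
--         index += 3
--     trimmed = "-".join(tokens[index:])
--     return trimmed or slug
-- ===== SOURCE B (Python) =====
-- def _strip_leading_date_tokens(slug: str) -> str: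
--     # Normalize, then strip leading 4-digit/2-digit/2-digit date groups by scanning
--     # the string itself instead of indexing a token list.
--     rest = "-".join(t for t in slug.split("-") if t)
--     while True:
--         seg = rest[:10]
--         if not (len(seg) == 10 and seg[:4].isdigit() and seg[4] == "-"
--                 and seg[5:7].isdigit() and seg[7] == "-" and seg[8:10].isdigit()):
--             break
--         tail = rest[10:]
--         if not tail:
--             rest = ""
--             break
--         if tail[0] != "-":
--             break
--         rest = tail[1:]
--     return rest or slug
-- ===== Notes on version B (the rewrite author's own statement) =====
-- stated objective: alternative
-- what changed: Replaces A's token-list while loop (index arithmetic over tokens[i:i+3] triples) by a character-level prefix matcher that repeatedly strips a literal 4-digit/2-digit/2-digit date group from the front of the normalized dash-joined string.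
import Mathlib
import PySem

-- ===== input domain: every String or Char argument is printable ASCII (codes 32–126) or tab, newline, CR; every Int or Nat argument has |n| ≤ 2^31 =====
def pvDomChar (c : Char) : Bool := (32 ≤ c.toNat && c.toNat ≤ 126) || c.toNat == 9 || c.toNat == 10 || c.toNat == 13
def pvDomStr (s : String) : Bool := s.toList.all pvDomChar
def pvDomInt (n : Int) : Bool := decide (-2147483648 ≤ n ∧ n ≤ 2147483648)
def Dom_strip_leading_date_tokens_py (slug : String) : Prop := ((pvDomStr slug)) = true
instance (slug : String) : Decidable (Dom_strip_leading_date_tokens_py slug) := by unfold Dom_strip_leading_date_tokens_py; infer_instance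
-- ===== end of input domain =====

-- B strips leading YYYY-MM-DD groups by a character-level prefix matcher on the
-- normalized dash-joined string instead of A's index loop over the token list
-- (objective: alternative algorithm, same cost).

-- ===== PORT A =====
-- the per-triple check of A's loop body
def aDateOk (y m d : List Char) : Bool :=
  y.length == 4 && PySem.Chars.strIsdigit y &&
  m.length == 2 && PySem.Chars.strIsdigit m &&
  d.length == 2 && PySem.Chars.strIsdigit d

-- A's while loop: 'tokens[index : index + 3]' is '(tokens.drop index).take 3' (index ≥ 0, step 1)
def aLoop (tokens : List (List Char)) (index : Nat) : Nat :=
  if index + 2 < tokens.length then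
    match (tokens.drop index).take 3 with
    | [y, m, d] => if aDateOk y m d then aLoop tokens (index + 3) else index
    | _ => index  -- unreachable: the slice has length 3 when index + 2 < len
  else index
termination_by tokens.length - index

def strip_leading_date_tokens_py (slug : String) : String :=
  let tokens := (PySem.Chars.splitOn slug.toList ['-']).filter (fun t => !t.isEmpty)
  let index := aLoop tokens 0
  let trimmed := PySem.Chars.join ['-'] (tokens.drop index)
  if trimmed.isEmpty then slug else String.ofList trimmed

-- ===== PORT B =====
-- termination helper for bLoop (cited by decreasing_by)
theorem bMatch10_length {rs : List Char}
    (h : ((rs.take 10).length == 10) = true) : 10 ≤ rs.length := by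
  have h' : (List.take 10 rs).length = 10 := by simpa using h
  rw [List.length_take] at h'
  omega

-- the guard of B's while loop on the current suffix 'rest'
def bMatch10 (rs : List Char) : Bool :=
  let seg := rs.take 10
  seg.length == 10 &&
  PySem.Chars.strIsdigit (seg.take 4) &&
  seg[4]? == some '-' &&
  PySem.Chars.strIsdigit ((seg.drop 5).take 2) &&
  seg[7]? == some '-' &&
  PySem.Chars.strIsdigit ((seg.drop 8).take 2)

-- B's while loop, the suffix 'rest' as the state
def bLoop (rs : List Char) : List Char :=
  if h : bMatch10 rs then
    match h2 : rs.drop 10 with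
    | [] => []                                  -- 'rest = ""; break'
    | c :: tl => if c = '-' then bLoop tl else rs
  else rs
termination_by rs.length
decreasing_by
  have h10 : 10 ≤ rs.length := by
    unfold bMatch10 at h
    exact bMatch10_length (by simpa using (Bool.and_elim_left (Bool.and_elim_left
      (Bool.and_elim_left (Bool.and_elim_left (Bool.and_elim_left h))))))
  have hlen := congrArg List.length h2
  simp at hlen
  omega

def strip_leading_date_tokens_py_alt (slug : String) : String :=
  let clean := PySem.Chars.join ['-']
    ((PySem.Chars.splitOn slug.toList ['-']).filter (fun t => !t.isEmpty))
  let rest := bLoop clean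
  if rest.isEmpty then slug else String.ofList rest

-- ===== PRECONDITION & SPEC =====
def Spec_strip_leading_date_tokens_py (slug : String) (out : String) : Prop := out = strip_leading_date_tokens_py_alt slug
instance (slug : String) (out : String) : Decidable (Spec_strip_leading_date_tokens_py slug out) := by unfold Spec_strip_leading_date_tokens_py; infer_instance

-- ===== CLAIM (what is proved, stated in full; the proofs are below) =====
def Claim_equal_strip_leading_date_tokens_py : Prop := ∀ (slug : String), Dom_strip_leading_date_tokens_py slug → Spec_strip_leading_date_tokens_py slug (strip_leading_date_tokens_py slug)

-- ===== LEMMAS AND PROOFS =====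

-- tokens produced by splitOn a single '-' contain no '-'
theorem splitOn_go_no_sep (fuel : Nat) (l cur : List Char) (acc : List (List Char))
    (hl : l.length ≤ fuel)
    (hacc : ∀ t ∈ acc, '-' ∉ t) (hcur : '-' ∉ cur) :
    ∀ t ∈ PySem.Chars.splitOn.go ['-'] fuel l cur acc, '-' ∉ t := by
  induction fuel generalizing l cur acc with
  | zero =>
    have : l = [] := List.eq_nil_of_length_eq_zero (Nat.le_zero.mp hl)
    subst this
    simp only [PySem.Chars.splitOn.go, List.mem_reverse, List.mem_cons, List.append_nil]
    intro t ht
    rcases ht with h | h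
    · subst h; simpa using hcur
    · exact hacc t h
  | succ n ih =>
    match l with
    | [] =>
      simp only [PySem.Chars.splitOn.go, List.mem_reverse, List.mem_cons]
      intro t ht
      rcases ht with h | h
      · subst h; simpa using hcur
      · exact hacc t h
    | c :: rest =>
      rw [PySem.Chars.splitOn.go]
      by_cases h : c = '-'
      · subst h
        simp only [List.isPrefixOf, beq_self_eq_true, Bool.and_self, if_pos]
        refine ih _ _ _ (by simpa using Nat.le_of_succ_le_succ hl) ?_ (by simp)
        intro t ht
        rcases List.mem_cons.mp ht with h | h
        · subst h; simpa using hcur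
        · exact hacc t h
      · have hp : List.isPrefixOf ['-'] (c :: rest) = false := by
          simp [List.isPrefixOf]; exact fun hh => absurd hh.symm h
        rw [hp]
        simp only [Bool.false_eq_true, if_false]
        refine ih _ _ _ (Nat.le_of_succ_le_succ hl) hacc ?_
        intro hmem
        rcases List.mem_cons.mp hmem with hh | hh
        · exact h hh.symm
        · exact hcur hh

theorem splitOn_no_sep (s : List Char) : ∀ t ∈ PySem.Chars.splitOn s ['-'], '-' ∉ t := by
  unfold PySem.Chars.splitOn
  exact splitOn_go_no_sep _ _ _ _ (by omega) (by simp) (by simp)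

-- well-formed token lists: nonempty, dash-free
def WfToks (ts : List (List Char)) : Prop := ∀ t ∈ ts, t ≠ [] ∧ '-' ∉ t

-- specification-level group dropper both loops compute
def dropG : List (List Char) → List (List Char)
  | y :: m :: d :: rest => if aDateOk y m d then dropG rest else y :: m :: d :: rest
  | [] => []
  | [y] => [y]
  | [y, m] => [y, m]

theorem aLoop_drop (ts : List (List Char)) (i : Nat) :
    ts.drop (aLoop ts i) = dropG (ts.drop i) := by
  fun_induction aLoop ts i
  case case1 i hlt y m d heq hok ih =>
    have h1 := (List.take_append_drop 3 (ts.drop i)).symm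
    rw [heq, List.drop_drop] at h1
    have hsplit : ts.drop i = y :: m :: d :: ts.drop (i + 3) := by
      simpa [Nat.add_comm] using h1
    rw [ih, hsplit, dropG, if_pos hok]
  case case2 i hlt y m d heq hok =>
    have h1 := (List.take_append_drop 3 (ts.drop i)).symm
    rw [heq, List.drop_drop] at h1
    have hsplit : ts.drop i = y :: m :: d :: ts.drop (i + 3) := by
      simpa [Nat.add_comm] using h1
    rw [hsplit, dropG, if_neg (by simpa using hok)]
  case case3 i hlt heq =>
    exfalso
    have h3 : ((ts.drop i).take 3).length = 3 := by
      rw [List.length_take, List.length_drop]; omega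
    match hx : (ts.drop i).take 3, h3 with
    | [a, b, c], _ => exact heq a b c hx
  case case4 i hlt =>
    have hlen : (ts.drop i).length ≤ 2 := by
      rw [List.length_drop]; omega
    match hh : ts.drop i with
    | [] => simp [dropG]
    | [y] => simp [dropG]
    | [y, m] => simp [dropG]
    | y :: m :: d :: r => rw [hh] at hlen; simp at hlen

theorem isdigit_ne_dash {c : Char} (h : PySem.Chars.isdigit c = true) : c ≠ '-' := by
  intro hc; subst hc; simp [PySem.Chars.isdigit] at h

-- the first token of a dash-join ends exactly at the first dash
theorem tok_step (t : List Char) (ht : t ≠ []) (hd : '-' ∉ t) (ts : List (List Char)) (k : Nat)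
    (hdig : ∀ c ∈ (PySem.Chars.join ['-'] (t :: ts)).take k, PySem.Chars.isdigit c = true)
    (hk : (PySem.Chars.join ['-'] (t :: ts))[k]? = some '-') :
    t.length = k ∧ ts ≠ [] ∧ (PySem.Chars.join ['-'] (t :: ts)).drop (k + 1) = PySem.Chars.join ['-'] ts ∧
      (PySem.Chars.join ['-'] (t :: ts)).take k = t := by
  match ts with
  | [] =>
    rw [PySem.Chars.join_singleton] at hk
    exact absurd (List.mem_of_getElem? hk) hd
  | u :: ts' =>
    rw [PySem.Chars.join_cons_cons] at hdig hk ⊢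
    set X := t ++ ['-'] ++ PySem.Chars.join ['-'] (u :: ts') with hX
    have hXe : X = t ++ ('-' :: PySem.Chars.join ['-'] (u :: ts')) := by
      rw [hX, List.append_assoc]; rfl
    have hlk : t.length = k := by
      rcases Nat.lt_trichotomy t.length k with hlt | he | hgt
      · exfalso
        have hx : X[t.length]? = some '-' := by
          rw [hXe, List.getElem?_append]
          simp
        have hmem : '-' ∈ X.take k := by
          have : (X.take k)[t.length]? = some '-' := by
            rw [List.getElem?_take, if_pos hlt, hx]
          exact List.mem_of_getElem? this
        exact isdigit_ne_dash (hdig _ hmem) rfl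
      · exact he
      · exfalso
        have hx : X[k]? = t[k]? := by
          rw [hXe, List.getElem?_append, if_pos (by omega)]
        rw [hx] at hk
        exact hd (List.mem_of_getElem? hk)
    refine ⟨hlk, by simp, ?_, ?_⟩
    · rw [hX, ← hlk]
      rw [show t.length + 1 = (t ++ ['-']).length by simp]
      exact List.drop_left
    · rw [hXe, ← hlk]
      exact List.take_left

theorem len4_decomp {y : List Char} (h : y.length = 4) : ∃ a b c d, y = [a, b, c, d] := by
  match y, h with
  | [a, b, c, d], _ => exact ⟨a, b, c, d, rfl⟩

theorem len2_decomp {y : List Char} (h : y.length = 2) : ∃ a b, y = [a, b] := by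
  match y, h with
  | [a, b], _ => exact ⟨a, b, rfl⟩

theorem step_match (y m d : List Char) (rest : List (List Char)) (hok : aDateOk y m d = true) :
    bMatch10 (PySem.Chars.join ['-'] (y :: m :: d :: rest)) = true ∧
    (PySem.Chars.join ['-'] (y :: m :: d :: rest)).drop 10 =
      (match rest with | [] => ([] : List Char) | _ :: _ => '-' :: PySem.Chars.join ['-'] rest) := by
  simp only [aDateOk, Bool.and_eq_true, beq_iff_eq] at hok
  obtain ⟨⟨⟨⟨⟨hy4, hyd⟩, hm2⟩, hmd⟩, hd2⟩, hdd⟩ := hok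
  obtain ⟨a1, a2, a3, a4, rfl⟩ := len4_decomp hy4
  obtain ⟨b1, b2, rfl⟩ := len2_decomp hm2
  obtain ⟨c1, c2, rfl⟩ := len2_decomp hd2
  simp only [PySem.Chars.strIsdigit, List.all_cons, List.all_nil, Bool.and_eq_true,
    List.isEmpty_cons, Bool.not_false, true_and, Bool.and_true] at hyd hmd hdd
  match rest with
  | [] =>
    rw [PySem.Chars.join_cons_cons, PySem.Chars.join_cons_cons, PySem.Chars.join_singleton]
    refine ⟨?_, by simp⟩
    simp [bMatch10, PySem.Chars.strIsdigit, hyd, hmd, hdd]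
  | u :: rest' =>
    rw [PySem.Chars.join_cons_cons, PySem.Chars.join_cons_cons, PySem.Chars.join_cons_cons]
    refine ⟨?_, by simp⟩
    simp [bMatch10, PySem.Chars.strIsdigit, hyd, hmd, hdd]

theorem J_pos (t : List Char) (ts : List (List Char)) (ht : t ≠ []) :
    1 ≤ (PySem.Chars.join ['-'] (t :: ts)).length := by
  match ts with
  | [] => rw [PySem.Chars.join_singleton]; exact List.length_pos_of_ne_nil ht
  | u :: ts' => rw [PySem.Chars.join_cons_cons]; simp; omega

theorem match_decomp (ts : List (List Char)) (hwf : WfToks ts)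
    (hm : bMatch10 (PySem.Chars.join ['-'] ts) = true)
    (hb : (PySem.Chars.join ['-'] ts).drop 10 = [] ∨
          ∃ tl, (PySem.Chars.join ['-'] ts).drop 10 = '-' :: tl) :
    ∃ y m d rest, ts = y :: m :: d :: rest ∧ aDateOk y m d = true := by
  set X := PySem.Chars.join ['-'] ts with hXdef
  simp only [bMatch10, Bool.and_eq_true, beq_iff_eq] at hm
  obtain ⟨⟨⟨⟨⟨hlen, hd1⟩, h4⟩, hd2⟩, h7⟩, hd3⟩ := hm
  have hX10 : 10 ≤ X.length := by rw [List.length_take] at hlen; omega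
  -- rewrite the seg-based facts to facts about X
  rw [List.take_take] at hd1
  norm_num at hd1
  rw [List.getElem?_take, if_pos (by omega)] at h4
  rw [List.drop_take, List.take_take] at hd2
  norm_num at hd2
  rw [List.getElem?_take, if_pos (by omega)] at h7
  rw [List.drop_take, List.take_take] at hd3
  norm_num at hd3
  simp only [PySem.Chars.strIsdigit, Bool.and_eq_true, List.all_eq_true] at hd1 hd2 hd3
  obtain ⟨-, hd1⟩ := hd1
  obtain ⟨-, hd2⟩ := hd2
  obtain ⟨-, hd3⟩ := hd3
  match ts, hXdef with
  | [], hXdef => rw [PySem.Chars.join_nil] at hXdef; rw [hXdef] at hX10; simp at hX10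
  | t :: ts', hXdef =>
    obtain ⟨ht_ne, ht_nd⟩ := hwf t (by simp)
    obtain ⟨hl4, hts', hdrop5, htake4⟩ := tok_step t ht_ne ht_nd ts' 4 (by rw [← hXdef]; exact hd1) (by rw [← hXdef]; exact h4)
    rw [← hXdef] at hdrop5 htake4
    match ts', hts' with
    | u :: ts'', _ =>
      obtain ⟨hu_ne, hu_nd⟩ := hwf u (by simp)
      have hdig2 : ∀ c ∈ (PySem.Chars.join ['-'] (u :: ts'')).take 2, PySem.Chars.isdigit c = true := by
        rw [← hdrop5]; exact hd2
      have hk2 : (PySem.Chars.join ['-'] (u :: ts''))[2]? = some '-' := by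
        rw [← hdrop5, List.getElem?_drop]; exact h7
      obtain ⟨hl2, hts'', hdrop3, htake2⟩ := tok_step u hu_ne hu_nd ts'' 2 hdig2 hk2
      have hX8 : X.drop 8 = PySem.Chars.join ['-'] ts'' := by
        rw [show (8:Nat) = 5 + 3 by rfl, ← List.drop_drop, hdrop5, hdrop3]
      match ts'', hts'' with
      | v :: ts''', _ =>
        obtain ⟨hv_ne, hv_nd⟩ := hwf v (by simp)
        have hdig3 : ∀ c ∈ (PySem.Chars.join ['-'] (v :: ts''')).take 2, PySem.Chars.isdigit c = true := by
          rw [← hX8]; exact hd3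
        have hb' : (PySem.Chars.join ['-'] (v :: ts''')).drop 2 = X.drop 10 := by
          rw [← hX8, List.drop_drop]
        have hdigt : PySem.Chars.strIsdigit t = true := by
          simp only [PySem.Chars.strIsdigit, Bool.and_eq_true, List.all_eq_true]
          refine ⟨by simpa using ht_ne, fun c hc => hd1 c (by rw [htake4]; exact hc)⟩
        have hdigu : PySem.Chars.strIsdigit u = true := by
          simp only [PySem.Chars.strIsdigit, Bool.and_eq_true, List.all_eq_true]
          refine ⟨by simpa using hu_ne, fun c hc => hdig2 c (by rw [htake2]; exact hc)⟩
        rcases hb with hnil | ⟨tl, htl⟩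
        · -- the string ends right after the day: last token is v, exactly 2 digits
          rw [← hb'] at hnil
          have hle2 : (PySem.Chars.join ['-'] (v :: ts''')).length ≤ 2 := by
            have := congrArg List.length hnil
            simp at this
            omega
          have hts3 : ts''' = [] := by
            match ts''', hle2 with
            | [], _ => rfl
            | w :: r, hle2 => 
              exfalso
              rw [PySem.Chars.join_cons_cons] at hle2
              obtain ⟨hw_ne, -⟩ := hwf w (by simp)
              have h1 : 1 ≤ v.length := List.length_pos_of_ne_nil hv_ne
              have h2 : 1 ≤ (PySem.Chars.join ['-'] (w :: r)).length := J_pos w r hw_ne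
              simp at hle2
              omega
          subst hts3
          rw [PySem.Chars.join_singleton] at hnil hdig3 hle2
          have hge2 : 2 ≤ v.length := by
            have hlx : (X.drop 8).length = X.length - 8 := by rw [List.length_drop]
            rw [hX8, PySem.Chars.join_singleton] at hlx
            omega
          have hvl : v.length = 2 := le_antisymm hle2 hge2
          have hdigv : PySem.Chars.strIsdigit v = true := by
            simp only [PySem.Chars.strIsdigit, Bool.and_eq_true, List.all_eq_true]
            refine ⟨by simpa using hv_ne, fun c hc => hdig3 c ?_⟩
            rw [← List.take_of_length_le (le_of_eq hvl)] at hc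
            exact hc
          exact ⟨t, u, v, [], rfl, by simp [aDateOk, hl4, hl2, hvl, hdigt, hdigu, hdigv]⟩
        · -- a dash follows the day: v is exactly 2 digits, more tokens follow
          rw [← hb'] at htl
          have hk2' : (PySem.Chars.join ['-'] (v :: ts'''))[2]? = some '-' := by
            have : (PySem.Chars.join ['-'] (v :: ts''')).drop 2 = '-' :: tl := htl
            have h0 := congrArg (fun l => l[0]?) this
            simpa [List.getElem?_drop] using h0
          obtain ⟨hvl, -, -, htakev⟩ := tok_step v hv_ne hv_nd ts''' 2 hdig3 hk2'
          have hdigv : PySem.Chars.strIsdigit v = true := by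
            simp only [PySem.Chars.strIsdigit, Bool.and_eq_true, List.all_eq_true]
            refine ⟨by simpa using hv_ne, fun c hc => hdig3 c (by rw [htakev]; exact hc)⟩
          exact ⟨t, u, v, ts''', rfl, by simp [aDateOk, hl4, hl2, hvl, hdigt, hdigu, hdigv]⟩

theorem bLoop_fix (ts : List (List Char)) (hwf : WfToks ts)
    (hnd : ∀ y m d rest, ts = y :: m :: d :: rest → aDateOk y m d = false) :
    bLoop (PySem.Chars.join ['-'] ts) = PySem.Chars.join ['-'] ts := by
  rw [bLoop]
  by_cases hm : bMatch10 (PySem.Chars.join ['-'] ts) = true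
  · rw [dif_pos hm]
    split
    · next h2 =>
      obtain ⟨y, m, d, rest, hts, hok⟩ := match_decomp ts hwf hm (Or.inl h2)
      rw [hnd y m d rest hts] at hok
      cases hok
    · next c tl h2 =>
      by_cases hc : c = '-'
      · subst hc
        obtain ⟨y, m, d, rest, hts, hok⟩ := match_decomp ts hwf hm (Or.inr ⟨tl, h2⟩)
        rw [hnd y m d rest hts] at hok
        cases hok
      · rw [if_neg hc]
  · rw [dif_neg hm]

theorem bLoop_join_aux : ∀ (n : Nat) (ts : List (List Char)), ts.length ≤ n → WfToks ts →
    bLoop (PySem.Chars.join ['-'] ts) = PySem.Chars.join ['-'] (dropG ts) := by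
  intro n
  induction n with
  | zero =>
    intro ts hlen _
    have hts : ts = [] := List.eq_nil_of_length_eq_zero (Nat.le_zero.mp hlen)
    subst hts
    rw [dropG, PySem.Chars.join_nil, bLoop, dif_neg (by decide)]
  | succ n ih =>
    intro ts hlen hwf
    match ts with
    | [] => rw [dropG, PySem.Chars.join_nil, bLoop, dif_neg (by decide)]
    | [y] => rw [dropG]; exact bLoop_fix [y] hwf (by intro a b c r h; cases h)
    | [y, m] => rw [dropG]; exact bLoop_fix [y, m] hwf (by intro a b c r h; cases h)
    | y :: m :: d :: rest =>
      by_cases hok : aDateOk y m d = true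
      · obtain ⟨hm, hdr⟩ := step_match y m d rest hok
        rw [dropG, if_pos hok, bLoop, dif_pos hm]
        have hwfr : WfToks rest := fun t ht => hwf t (by simp [ht])
        have hlr : rest.length ≤ n := by simp at hlen; omega
        split
        · next h2 =>
          rw [hdr] at h2
          match rest, h2 with
          | [], _ => rw [dropG, PySem.Chars.join_nil]
        · next c tl h2 =>
          rw [hdr] at h2
          match rest, h2 with
          | u :: rest', h2 =>
            have hc : c = '-' := (List.cons.inj h2).1.symm
            have htl : tl = PySem.Chars.join ['-'] (u :: rest') := ((List.cons.inj h2).2).symm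
            rw [if_pos hc, htl]
            exact ih (u :: rest') hlr hwfr
      · rw [dropG, if_neg hok]
        exact bLoop_fix _ hwf (by
          intro a b c r h
          obtain ⟨h1, h2, h3, -⟩ : a = y ∧ b = m ∧ c = d ∧ r = rest := by
            have := List.cons.inj h
            have h2 := List.cons.inj this.2
            have h3 := List.cons.inj h2.2
            exact ⟨this.1.symm, h2.1.symm, h3.1.symm, h3.2.symm⟩
          subst h1; subst h2; subst h3
          simpa using hok)

theorem bLoop_join (ts : List (List Char)) (hwf : WfToks ts) :
    bLoop (PySem.Chars.join ['-'] ts) = PySem.Chars.join ['-'] (dropG ts) :=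
  bLoop_join_aux ts.length ts le_rfl hwf

-- ===== VERDICT (by name: the statement is the Claim_ definition above) =====
theorem strip_leading_date_tokens_py_spec : Claim_equal_strip_leading_date_tokens_py := by
  intro slug _
  unfold Spec_strip_leading_date_tokens_py strip_leading_date_tokens_py strip_leading_date_tokens_py_alt
  simp only
  have hwf : WfToks ((PySem.Chars.splitOn slug.toList ['-']).filter (fun t => !t.isEmpty)) := by
    intro t ht
    rcases List.mem_filter.mp ht with ⟨hmem, hne⟩
    exact ⟨by simpa using hne, splitOn_no_sep _ t hmem⟩
  have hA := aLoop_drop ((PySem.Chars.splitOn slug.toList ['-']).filter (fun t => !t.isEmpty)) 0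
  simp only [List.drop_zero] at hA
  rw [hA, bLoop_join _ hwf]
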